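-- pv_equiv track=rewrite | github.com/xdavidg/comp_programming | Leetcode/2818.py | compute_subarray_counts
-- ===== SOURCE A (Python) =====
-- def compute_subarray_counts(p_score):
--     n = len(p_score)
--     left = [0] * n
--     right = [0] * n
--
--     stack = []
--     for i in range(n):
--         while stack and p_score[stack[-1]] < p_score[i]:
--             stack.pop()
--         left[i] = stack[-1] + 1 if stack else 0
--         stack.append(i)
--
--     stack = []
--     for i in range(n - 1, -1, -1):
--         while stack and p_score[stack[-1]] <= p_score[i]:
--             stack.pop()
--         right[i] = stack[-1] - 1 if stack else n - 1
--         stack.append(i)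
--
--     counts = [(i - left[i] + 1) * (right[i] - i + 1) for i in range(n)]
--     return counts
-- ===== SOURCE B (Python) =====
-- def compute_subarray_counts(p_score):
--     # Boundary-jumping: reuse previously computed boundaries instead of a monotonic stack.
--     n = len(p_score)
--     left = []
--     for i in range(n):
--         j = i - 1
--         while j >= 0 and p_score[j] < p_score[i]:
--             j = left[j] - 1
--         left.append(j + 1)
--     right = []
--     for i in range(n - 1, -1, -1):
--         j = i + 1
--         while j <= n - 1 and p_score[j] <= p_score[i]:
--             j = right[n - 1 - j] + 1
--         right.append(j - 1)
--     right.reverse()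
--     return [(i - left[i] + 1) * (right[i] - i + 1) for i in range(n)]
-- ===== Notes on version B (the rewrite author's own statement) =====
-- stated objective: alternative
-- what changed: Replaces the two monotonic-stack passes with boundary-jumping: each index finds its left/right boundary by hopping through boundaries already computed for nearer indices, so no stack is ever maintained.
import Mathlib
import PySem

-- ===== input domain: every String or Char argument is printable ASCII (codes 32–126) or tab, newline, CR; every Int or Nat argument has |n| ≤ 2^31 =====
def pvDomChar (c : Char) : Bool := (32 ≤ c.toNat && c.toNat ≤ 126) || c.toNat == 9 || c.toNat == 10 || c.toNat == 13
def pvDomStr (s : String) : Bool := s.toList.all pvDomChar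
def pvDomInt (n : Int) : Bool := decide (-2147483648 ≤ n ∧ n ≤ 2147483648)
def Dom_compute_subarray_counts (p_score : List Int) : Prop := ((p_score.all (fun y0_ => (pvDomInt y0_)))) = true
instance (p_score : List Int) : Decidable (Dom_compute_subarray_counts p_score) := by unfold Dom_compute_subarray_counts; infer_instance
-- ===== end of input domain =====

-- B replaces the two monotonic-stack passes with boundary-jumping via previously computed boundaries (alternative algorithm, no stack).

-- ===== PORT A =====
-- the inner `while stack and p_score[stack[-1]] < p_score[i]: stack.pop()` loop (stack held top-at-head)
def pvPopL (p : List Int) (x : Int) : List Nat → List Nat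
  | [] => []
  | t :: rest => if p.getD t 0 < x then pvPopL p x rest else t :: rest

-- the inner `while stack and p_score[stack[-1]] <= p_score[i]: stack.pop()` loop (stack held top-at-head)
def pvPopR (p : List Int) (x : Int) : List Nat → List Nat
  | [] => []
  | t :: rest => if p.getD t 0 ≤ x then pvPopR p x rest else t :: rest

def compute_subarray_counts (p_score : List Int) : List Int :=
  let n := p_score.length
  let lp := (List.range n).foldl (fun (st : List Int × List Nat) i =>
      let s := pvPopL p_score (p_score.getD i 0) st.2
      (st.1 ++ [match s with | [] => (0 : Int) | t :: _ => (t : Int) + 1], i :: s)) ([], [])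
  let left := lp.1
  let rp := (List.range n).reverse.foldl (fun (st : List Int × List Nat) i =>
      let s := pvPopR p_score (p_score.getD i 0) st.2
      ((match s with | [] => (n : Int) - 1 | t :: _ => (t : Int) - 1) :: st.1, i :: s)) ([], [])
  let right := rp.1
  (List.range n).map (fun (i : Nat) => ((i : Int) - left.getD i 0 + 1) * (right.getD i 0 - (i : Int) + 1))

-- ===== PORT B =====
-- `while j >= 0 and p_score[j] < p_score[i]: j = left[j] - 1` (fuel bounds the jump count)
def pvJumpL (p : List Int) (x : Int) (left : List Int) : Nat → Int → Int
  | 0, j => j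
  | fuel + 1, j =>
    if 0 ≤ j ∧ p.getD j.toNat 0 < x then pvJumpL p x left fuel (left.getD j.toNat 0 - 1) else j

-- `while j <= n - 1 and p_score[j] <= p_score[i]: j = right[n - 1 - j] + 1`
def pvJumpR (p : List Int) (x : Int) (n : Nat) (right : List Int) : Nat → Int → Int
  | 0, j => j
  | fuel + 1, j =>
    if j ≤ (n : Int) - 1 ∧ p.getD j.toNat 0 ≤ x then
      pvJumpR p x n right fuel (right.getD (n - 1 - j.toNat) 0 + 1)
    else j

def compute_subarray_counts_alt (p_score : List Int) : List Int :=
  let n := p_score.length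
  let left := (List.range n).foldl (fun (acc : List Int) i =>
      acc ++ [pvJumpL p_score (p_score.getD i 0) acc i ((i : Int) - 1) + 1]) []
  let right := ((List.range n).reverse.foldl (fun (acc : List Int) i =>
      acc ++ [pvJumpR p_score (p_score.getD i 0) n acc (n - i) ((i : Int) + 1) - 1]) []).reverse
  (List.range n).map (fun (i : Nat) => ((i : Int) - left.getD i 0 + 1) * (right.getD i 0 - (i : Int) + 1))

-- ===== PRECONDITION & SPEC =====
def Spec_compute_subarray_counts (p_score : List Int) (out : List Int) : Prop := out = compute_subarray_counts_alt p_score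
instance (p_score : List Int) (out : List Int) : Decidable (Spec_compute_subarray_counts p_score out) := by unfold Spec_compute_subarray_counts; infer_instance

-- ===== CLAIM (what is proved, stated in full; the proofs are below) =====
def Claim_equal_compute_subarray_counts : Prop := ∀ (p_score : List Int), Dom_compute_subarray_counts p_score → Spec_compute_subarray_counts p_score (compute_subarray_counts p_score)

-- ===== LEMMAS AND PROOFS =====

-- characterization helpers used only by the proofs: the boundary as a leftward / rightward scan
def pvScanL (p : List Int) (x : Int) : Nat → Nat
  | 0 => 0
  | l + 1 => if p.getD l 0 < x then pvScanL p x l else l + 1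

def pvScanR (p : List Int) (x : Int) : Nat → Nat → Nat
  | 0, r => r
  | fuel + 1, r => if p.getD (r + 1) 0 ≤ x then pvScanR p x fuel (r + 1) else r

-- contents of the first-pass stack after processing indices 0..i-1 (top at head):
-- exactly the j < i whose value is ≥ every later value in the prefix
def suffL (p : List Int) (i : Nat) : List Nat :=
  ((List.range i).filter (fun j => decide (∀ k < i, j < k → p.getD k 0 ≤ p.getD j 0))).reverse

-- [i, i+1, ..., n-1]
def rangeFrom (i n : Nat) : List Nat := (List.range (n - i)).map (i + ·)

-- contents of the second-pass stack after processing indices n-1 down to i (top at head):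
-- exactly the j in [i,n) whose value is > every earlier value back to index i
def suffR (p : List Int) (n i : Nat) : List Nat :=
  (rangeFrom i n).filter (fun j => decide (∀ k < j, i ≤ k → p.getD k 0 < p.getD j 0))

lemma mem_rangeFrom {i n j : Nat} : j ∈ rangeFrom i n ↔ i ≤ j ∧ j < n := by
  simp only [rangeFrom, List.mem_map, List.mem_range]
  constructor
  · rintro ⟨a, ha, rfl⟩; omega
  · rintro ⟨h1, h2⟩; exact ⟨j - i, by omega, by omega⟩

lemma mem_suffL {p : List Int} {i j : Nat} :
    j ∈ suffL p i ↔ j < i ∧ ∀ k < i, j < k → p.getD k 0 ≤ p.getD j 0 := by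
  simp [suffL, List.mem_filter, List.mem_range]

lemma mem_suffR {p : List Int} {n i j : Nat} :
    j ∈ suffR p n i ↔ (i ≤ j ∧ j < n) ∧ ∀ k < j, i ≤ k → p.getD k 0 < p.getD j 0 := by
  simp [suffR, List.mem_filter, mem_rangeFrom]

lemma pairwise_suffL (p : List Int) (i : Nat) : (suffL p i).Pairwise (fun a b => b < a) := by
  rw [suffL, List.pairwise_reverse]
  exact List.Pairwise.sublist (List.filter_sublist) (List.pairwise_lt_range)

lemma pairwise_rangeFrom (i n : Nat) : (rangeFrom i n).Pairwise (fun a b => a < b) := by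
  exact List.Pairwise.map _ (fun a b h => by omega) (List.pairwise_lt_range)

lemma pairwise_suffR (p : List Int) (n i : Nat) : (suffR p n i).Pairwise (fun a b => a < b) := by
  exact List.Pairwise.sublist (List.filter_sublist) (pairwise_rangeFrom i n)

-- on a value-sorted stack, the pop loop is a filter
lemma pvPopL_eq_filter (p : List Int) (x : Int) :
    ∀ l : List Nat, l.Pairwise (fun a b => p.getD a 0 ≤ p.getD b 0) →
      pvPopL p x l = l.filter (fun j => decide (x ≤ p.getD j 0)) := by
  intro l hl
  induction l with
  | nil => rfl
  | cons t rest ih =>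
    rcases List.pairwise_cons.1 hl with ⟨hrel, hrest⟩
    by_cases h : p.getD t 0 < x
    · simp only [pvPopL, if_pos h, List.filter_cons, decide_eq_true_eq]
      rw [if_neg (by omega)]
      exact ih hrest
    · simp only [pvPopL, if_neg h, List.filter_cons, decide_eq_true_eq]
      rw [if_pos (by omega)]
      congr 1
      exact ((List.filter_eq_self).2 (fun b hb => by
        have := hrel b hb; simp only [decide_eq_true_eq]; omega)).symm

lemma pvPopR_eq_filter (p : List Int) (x : Int) :
    ∀ l : List Nat, l.Pairwise (fun a b => p.getD a 0 < p.getD b 0) →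
      pvPopR p x l = l.filter (fun j => decide (x < p.getD j 0)) := by
  intro l hl
  induction l with
  | nil => rfl
  | cons t rest ih =>
    rcases List.pairwise_cons.1 hl with ⟨hrel, hrest⟩
    by_cases h : p.getD t 0 ≤ x
    · simp only [pvPopR, if_pos h, List.filter_cons, decide_eq_true_eq]
      rw [if_neg (by omega)]
      exact ih hrest
    · simp only [pvPopR, if_neg h, List.filter_cons, decide_eq_true_eq]
      rw [if_pos (by omega)]
      congr 1
      exact ((List.filter_eq_self).2 (fun b hb => by
        have := hrel b hb; simp only [decide_eq_true_eq]; omega)).symm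

lemma pairwise_val_suffL (p : List Int) (i : Nat) :
    (suffL p i).Pairwise (fun a b => p.getD a 0 ≤ p.getD b 0) := by
  refine List.Pairwise.imp_of_mem ?_ (pairwise_suffL p i)
  intro a b ha hb hba
  rcases mem_suffL.1 ha with ⟨hai, _⟩
  rcases mem_suffL.1 hb with ⟨_, hbcond⟩
  exact hbcond a hai hba

lemma pairwise_val_suffR (p : List Int) (n i : Nat) :
    (suffR p n i).Pairwise (fun a b => p.getD a 0 < p.getD b 0) := by
  refine List.Pairwise.imp_of_mem ?_ (pairwise_suffR p n i)
  intro a b ha hb hab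
  rcases mem_suffR.1 ha with ⟨⟨hia, _⟩, _⟩
  rcases mem_suffR.1 hb with ⟨_, hbcond⟩
  exact hbcond a hab hia

-- stack evolution, left pass
lemma suffL_succ (p : List Int) (i : Nat) :
    suffL p (i + 1) = i :: (suffL p i).filter (fun j => decide (p.getD i 0 ≤ p.getD j 0)) := by
  unfold suffL
  rw [List.range_succ, List.filter_append]
  have hlast : List.filter (fun j => decide (∀ k < i + 1, j < k → p.getD k 0 ≤ p.getD j 0)) [i]
      = [i] := by
    simp only [List.filter_cons, List.filter_nil, decide_eq_true_eq]
    rw [if_pos (by omega)]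
  rw [hlast, List.reverse_append, List.reverse_cons, List.reverse_nil, List.nil_append,
    List.singleton_append]
  congr 1
  have htail : List.filter (fun j => decide (∀ k < i + 1, j < k → p.getD k 0 ≤ p.getD j 0))
        (List.range i)
      = List.filter (fun j => decide (p.getD i 0 ≤ p.getD j 0))
        (List.filter (fun j => decide (∀ k < i, j < k → p.getD k 0 ≤ p.getD j 0))
          (List.range i)) := by
    rw [List.filter_filter]
    apply List.filter_congr
    intro j hj
    rw [List.mem_range] at hj
    rw [Bool.eq_iff_iff]
    simp only [Bool.and_eq_true, decide_eq_true_eq]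
    constructor
    · intro h
      exact ⟨h i (by omega) hj, fun k hk hjk => h k (by omega) hjk⟩
    · intro h k hk hjk
      rcases Nat.lt_succ_iff_lt_or_eq.1 hk with hlt | rfl
      · exact h.2 k hlt hjk
      · exact h.1
  rw [htail]
  exact List.filter_reverse.symm

lemma rangeFrom_cons {i n : Nat} (hi : i < n) : rangeFrom i n = i :: rangeFrom (i + 1) n := by
  unfold rangeFrom
  rw [show n - i = (n - (i + 1)) + 1 by omega, List.range_succ_eq_map, List.map_cons,
    List.map_map]
  refine congrArg₂ _ (by omega) (List.map_congr_left fun a _ => ?_)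
  simp only [Function.comp_apply]
  omega

-- stack evolution, right pass
lemma suffR_step (p : List Int) (n i : Nat) (hi : i < n) :
    suffR p n i = i :: (suffR p n (i + 1)).filter (fun j => decide (p.getD i 0 < p.getD j 0)) := by
  unfold suffR
  rw [rangeFrom_cons hi, List.filter_cons]
  rw [if_pos (by simp only [decide_eq_true_eq]; omega)]
  congr 1
  rw [List.filter_filter]
  apply List.filter_congr
  intro j hj
  rcases mem_rangeFrom.1 hj with ⟨hij, hjn⟩
  rw [Bool.eq_iff_iff]
  simp only [Bool.and_eq_true, decide_eq_true_eq]
  constructor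
  · intro h
    exact ⟨h i (by omega) (by omega), fun k hk hik => h k hk (by omega)⟩
  · intro h k hk hik
    rcases Nat.lt_or_ge k (i + 1) with hlt | hge
    · rw [show k = i by omega]
      exact h.1
    · exact h.2 k hk hge

lemma scanL_zero (p : List Int) (x : Int) :
    ∀ i, (∀ j < i, p.getD j 0 < x) → pvScanL p x i = 0 := by
  intro i
  induction i with
  | zero => intro _; rfl
  | succ m ih =>
    intro h
    simp only [pvScanL, if_pos (h m (by omega))]
    exact ih (fun j hj => h j (by omega))

lemma scanL_stop (p : List Int) (x : Int) :
    ∀ i t, t < i → x ≤ p.getD t 0 → (∀ k, t < k → k < i → p.getD k 0 < x) →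
      pvScanL p x i = t + 1 := by
  intro i
  induction i with
  | zero => omega
  | succ m ih =>
    intro t ht hx h
    by_cases hm : t = m
    · subst hm
      simp only [pvScanL]
      rw [if_neg (not_lt.2 hx)]
    · simp only [pvScanL, if_pos (h m (by omega) (by omega))]
      exact ih t (by omega) hx (fun k hk1 hk2 => h k hk1 (by omega))

lemma scanR_full (p : List Int) (x : Int) :
    ∀ fuel r, (∀ k, r < k → k ≤ r + fuel → p.getD k 0 ≤ x) → pvScanR p x fuel r = r + fuel := by
  intro fuel
  induction fuel with
  | zero => intro r _; rfl
  | succ f ih =>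
    intro r h
    simp only [pvScanR, if_pos (h (r + 1) (by omega) (by omega))]
    rw [ih (r + 1) (fun k hk1 hk2 => h k (by omega) (by omega))]
    omega

lemma scanR_stop (p : List Int) (x : Int) :
    ∀ fuel r t, r < t → t ≤ r + fuel → (∀ k, r < k → k < t → p.getD k 0 ≤ x) →
      x < p.getD t 0 → pvScanR p x fuel r = t - 1 := by
  intro fuel
  induction fuel with
  | zero => omega
  | succ f ih =>
    intro r t h1 h2 h3 h4
    by_cases hrt : r + 1 = t
    · simp only [pvScanR]
      rw [show p.getD (r + 1) 0 = p.getD t 0 by rw [hrt], if_neg (not_le.2 h4)]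
      omega
    · simp only [pvScanR, if_pos (h3 (r + 1) (by omega) (by omega))]
      exact ih (r + 1) t (by omega) (by omega) (fun k hk1 hk2 => h3 k (by omega) hk2) h4

-- a greatest index below i satisfying a decidable property
lemma exists_greatest_lt {Q : Nat → Prop} [DecidablePred Q] :
    ∀ i, ∀ j < i, Q j → ∃ t, t < i ∧ Q t ∧ ∀ k, t < k → k < i → ¬ Q k := by
  intro i
  induction i with
  | zero => omega
  | succ m ih =>
    intro j hj hQ
    by_cases hm : Q m
    · exact ⟨m, by omega, hm, fun k hk1 hk2 => by omega⟩
    · rcases Nat.lt_succ_iff_lt_or_eq.1 hj with h | rfl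
      · obtain ⟨t, h1, h2, h3⟩ := ih j h hQ
        refine ⟨t, by omega, h2, fun k hk1 hk2 => ?_⟩
        by_cases hkm : k = m
        · subst hkm; exact hm
        · exact h3 k hk1 (by omega)
      · exact absurd hQ hm

-- a least index satisfying a decidable property
lemma exists_least {Q : Nat → Prop} [DecidablePred Q] (h : ∃ j, Q j) :
    ∃ t, Q t ∧ ∀ k < t, ¬ Q k :=
  ⟨Nat.find h, Nat.find_spec h, fun _ hk => Nat.find_min h hk⟩

-- the left value A assigns equals B's left scan
lemma leftVal_eq (p : List Int) (i : Nat) :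
    (match (suffL p i).filter (fun j => decide (p.getD i 0 ≤ p.getD j 0)) with
      | [] => (0 : Int) | t :: _ => (t : Int) + 1) = (pvScanL p (p.getD i 0) i : Int) := by
  set x := p.getD i 0 with hx
  cases hf : (suffL p i).filter (fun j => decide (x ≤ p.getD j 0)) with
  | nil =>
    rw [scanL_zero p x i ?_]
    · simp
    · intro j hj
      by_contra hnot
      rw [not_lt] at hnot
      obtain ⟨t, ht1, ht2, ht3⟩ :=
        exists_greatest_lt (Q := fun j => x ≤ p.getD j 0) i j hj hnot
      have htm : t ∈ (suffL p i).filter (fun j => decide (x ≤ p.getD j 0)) := by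
        rw [List.mem_filter, mem_suffL]
        refine ⟨⟨ht1, fun k hk htk => ?_⟩, by simpa using ht2⟩
        have := ht3 k htk hk
        omega
      rw [hf] at htm
      exact absurd htm (List.not_mem_nil)
  | cons t rest =>
    have htm : t ∈ (suffL p i).filter (fun j => decide (x ≤ p.getD j 0)) := by
      rw [hf]; exact List.mem_cons_self
    rw [List.mem_filter, mem_suffL] at htm
    rcases htm with ⟨⟨hti, _⟩, htx⟩
    rw [decide_eq_true_eq] at htx
    have hall : ∀ k, t < k → k < i → p.getD k 0 < x := by
      intro k hk1 hk2
      by_contra hnot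
      rw [not_lt] at hnot
      obtain ⟨k0, hk01, hk02, hk03⟩ :=
        exists_greatest_lt (Q := fun m => t < m ∧ x ≤ p.getD m 0) i k hk2 ⟨hk1, hnot⟩
      have hk0m : k0 ∈ (suffL p i).filter (fun j => decide (x ≤ p.getD j 0)) := by
        rw [List.mem_filter, mem_suffL]
        refine ⟨⟨hk01, fun m hm hk0lt => ?_⟩, by simpa using hk02.2⟩
        have := hk03 m hk0lt hm
        have : p.getD m 0 < x := by
          by_contra hge
          exact this ⟨by omega, by omega⟩
        omega
      rw [hf] at hk0m
      have : k0 ∈ rest := by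
        rcases List.mem_cons.1 hk0m with rfl | hr
        · omega
        · exact hr
      have hpw : (t :: rest).Pairwise (fun a b => b < a) := by
        rw [← hf]
        exact List.Pairwise.sublist List.filter_sublist (pairwise_suffL p i)
      have := List.rel_of_pairwise_cons hpw this
      omega
    rw [scanL_stop p x i t hti htx hall]
    push_cast
    ring

-- the right value A assigns equals B's right scan
lemma rightVal_eq (p : List Int) (n i : Nat) (hi : i < n) (hn : n = p.length) :
    (match (suffR p n (i + 1)).filter (fun j => decide (p.getD i 0 < p.getD j 0)) with
      | [] => (n : Int) - 1 | t :: _ => (t : Int) - 1)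
      = ((pvScanR p (p.getD i 0) (n - 1 - i) i : Nat) : Int) := by
  set x := p.getD i 0 with hx
  cases hf : (suffR p n (i + 1)).filter (fun j => decide (x < p.getD j 0)) with
  | nil =>
    rw [scanR_full p x (n - 1 - i) i ?_]
    · show (n : Int) - 1 = ((i + (n - 1 - i) : Nat) : Int)
      omega
    · intro k hk1 hk2
      by_contra hnot
      rw [not_le] at hnot
      obtain ⟨t, ht1, ht2⟩ := exists_least (Q := fun m => i < m ∧ x < p.getD m 0) ⟨k, hk1, hnot⟩
      have htk : t ≤ k := by
        by_contra hgt
        exact ht2 k (by omega) ⟨hk1, hnot⟩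
      have htm : t ∈ (suffR p n (i + 1)).filter (fun j => decide (x < p.getD j 0)) := by
        rw [List.mem_filter, mem_suffR]
        refine ⟨⟨⟨by omega, by omega⟩, fun m hm him => ?_⟩, by simpa using ht1.2⟩
        have hm2 : ¬ (i < m ∧ x < p.getD m 0) := ht2 m hm
        have : p.getD m 0 ≤ x := by
          by_contra hgt
          exact hm2 ⟨by omega, by omega⟩
        calc p.getD m 0 ≤ x := this
          _ < p.getD t 0 := ht1.2
      rw [hf] at htm
      exact absurd htm (List.not_mem_nil)
  | cons t rest =>
    have htm : t ∈ (suffR p n (i + 1)).filter (fun j => decide (x < p.getD j 0)) := by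
      rw [hf]; exact List.mem_cons_self
    rw [List.mem_filter, mem_suffR] at htm
    rcases htm with ⟨⟨⟨hit, htn⟩, _⟩, htx⟩
    rw [decide_eq_true_eq] at htx
    have hall : ∀ k, i < k → k < t → p.getD k 0 ≤ x := by
      intro k hk1 hk2
      by_contra hnot
      rw [not_le] at hnot
      obtain ⟨k0, hk01, hk02⟩ := exists_least (Q := fun m => i < m ∧ x < p.getD m 0) ⟨k, hk1, hnot⟩
      have hk0t : k0 ≤ k := by
        by_contra hgt
        exact hk02 k (by omega) ⟨hk1, hnot⟩
      have hk0m : k0 ∈ (suffR p n (i + 1)).filter (fun j => decide (x < p.getD j 0)) := by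
        rw [List.mem_filter, mem_suffR]
        refine ⟨⟨⟨by omega, by omega⟩, fun m hm him => ?_⟩, by simpa using hk01.2⟩
        have hm2 := hk02 m hm
        have : ¬ (i < m ∧ x < p.getD m 0) := hm2
        have : p.getD m 0 ≤ x := by
          by_contra hgt
          exact this ⟨by omega, by omega⟩
        calc p.getD m 0 ≤ x := this
          _ < p.getD k0 0 := hk01.2
      rw [hf] at hk0m
      have hk0r : k0 ∈ rest := by
        rcases List.mem_cons.1 hk0m with rfl | hr
        · omega
        · exact hr
      have hpw : (t :: rest).Pairwise (fun a b => a < b) := by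
        rw [← hf]
        exact List.Pairwise.sublist List.filter_sublist (pairwise_suffR p n (i + 1))
      have := List.rel_of_pairwise_cons hpw hk0r
      omega
    rw [scanR_stop p x (n - 1 - i) i t (by omega) (by omega) hall htx]
    show (t : Int) - 1 = ((t - 1 : Nat) : Int)
    omega

lemma left_fold (p : List Int) :
    ∀ m, (List.range m).foldl (fun (st : List Int × List Nat) i =>
        let s := pvPopL p (p.getD i 0) st.2
        (st.1 ++ [match s with | [] => (0 : Int) | t :: _ => (t : Int) + 1], i :: s)) ([], [])
      = ((List.range m).map (fun i => (pvScanL p (p.getD i 0) i : Int)), suffL p m) := by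
  intro m
  induction m with
  | zero => simp [suffL]
  | succ m ih =>
    rw [List.range_succ, List.foldl_append, ih, List.foldl_cons, List.foldl_nil]
    have hpop : pvPopL p (p.getD m 0) (suffL p m)
        = (suffL p m).filter (fun j => decide (p.getD m 0 ≤ p.getD j 0)) :=
      pvPopL_eq_filter p (p.getD m 0) (suffL p m) (pairwise_val_suffL p m)
    simp only [hpop]
    refine Prod.ext ?_ ?_
    · show _ = List.map (fun i => (pvScanL p (p.getD i 0) i : Int)) (List.range m ++ [m])
      rw [List.map_append, List.map_cons, List.map_nil, leftVal_eq p m]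
    · show _ = suffL p (m + 1)
      exact (suffL_succ p m).symm

lemma right_fold (p : List Int) (n : Nat) (hn : n = p.length) :
    ∀ fuel i, i + fuel = n →
      (rangeFrom i n).reverse.foldl (fun (st : List Int × List Nat) i =>
          let s := pvPopR p (p.getD i 0) st.2
          ((match s with | [] => (n : Int) - 1 | t :: _ => (t : Int) - 1) :: st.1, i :: s)) ([], [])
      = ((rangeFrom i n).map (fun i => ((pvScanR p (p.getD i 0) (n - 1 - i) i : Nat) : Int)), suffR p n i) := by
  intro fuel
  induction fuel with
  | zero =>
    intro i hi
    have : i = n := by omega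
    subst this
    simp [rangeFrom, suffR]
  | succ f ih =>
    intro i hi
    have hin : i < n := by omega
    rw [rangeFrom_cons hin, List.reverse_cons, List.foldl_append, ih (i + 1) (by omega),
      List.foldl_cons, List.foldl_nil]
    have hpop : pvPopR p (p.getD i 0) (suffR p n (i + 1))
        = (suffR p n (i + 1)).filter (fun j => decide (p.getD i 0 < p.getD j 0)) :=
      pvPopR_eq_filter p (p.getD i 0) (suffR p n (i + 1)) (pairwise_val_suffR p n (i + 1))
    simp only [hpop]
    refine Prod.ext ?_ ?_
    · show _ = List.map (fun i => ((pvScanR p (p.getD i 0) (n - 1 - i) i : Nat) : Int))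
        (i :: rangeFrom (i + 1) n)
      rw [List.map_cons, ← rightVal_eq p n i hin hn]
    · show _ = suffR p n i
      exact (suffR_step p n i hin).symm

-- ===== VERDICT (by name: the statement is the Claim_ definition above) =====
lemma rangeFrom_zero (n : Nat) : rangeFrom 0 n = List.range n := by
  simp [rangeFrom]

lemma getD_map_range {f : Nat → Int} {n i : Nat} (h : i < n) :
    ((List.range n).map f).getD i 0 = f i := by
  rw [List.getD_eq_getElem?_getD, List.getElem?_map, List.getElem?_range h]
  rfl

lemma scanL_le (p : List Int) (x : Int) : ∀ i, pvScanL p x i ≤ i := by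
  intro i
  induction i with
  | zero => simp [pvScanL]
  | succ m ih =>
    simp only [pvScanL]
    split
    · omega
    · omega

lemma scanL_after (p : List Int) (x : Int) :
    ∀ i k, pvScanL p x i ≤ k → k < i → p.getD k 0 < x := by
  intro i
  induction i with
  | zero => omega
  | succ m ih =>
    intro k h1 h2
    by_cases hm : p.getD m 0 < x
    · simp only [pvScanL, if_pos hm] at h1
      by_cases hk : k = m
      · subst hk; exact hm
      · exact ih k h1 (by omega)
    · simp only [pvScanL, if_neg hm] at h1
      omega

lemma scanR_ge (p : List Int) (x : Int) : ∀ fuel r, r ≤ pvScanR p x fuel r := by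
  intro fuel
  induction fuel with
  | zero => intro r; simp [pvScanR]
  | succ f ih =>
    intro r
    simp only [pvScanR]
    split
    · have := ih (r + 1); omega
    · omega

lemma scanR_le (p : List Int) (x : Int) : ∀ fuel r, pvScanR p x fuel r ≤ r + fuel := by
  intro fuel
  induction fuel with
  | zero => intro r; simp [pvScanR]
  | succ f ih =>
    intro r
    simp only [pvScanR]
    split
    · have := ih (r + 1); omega
    · omega

lemma scanR_within (p : List Int) (x : Int) :
    ∀ fuel r k, r < k → k ≤ pvScanR p x fuel r → p.getD k 0 ≤ x := by
  intro fuel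
  induction fuel with
  | zero => intro r k h1 h2; simp only [pvScanR] at h2; omega
  | succ f ih =>
    intro r k h1 h2
    by_cases hr : p.getD (r + 1) 0 ≤ x
    · simp only [pvScanR, if_pos hr] at h2
      by_cases hk : k = r + 1
      · subst hk; exact hr
      · exact ih (r + 1) k (by omega) h2
    · simp only [pvScanR, if_neg hr] at h2
      omega

-- the left jump loop of B lands exactly at the boundary the left scan characterizes
lemma jumpL_eq (p : List Int) (x : Int) (left : List Int) (i : Nat)
    (hleft : ∀ m < i, left.getD m 0 = (pvScanL p (p.getD m 0) m : Int)) :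
    ∀ (fuel : Nat) (j : Int), -1 ≤ j → j < (i : Int) → j + 1 ≤ (fuel : Int) →
      (∀ k : Nat, j < (k : Int) → k < i → p.getD k 0 < x) →
      pvJumpL p x left fuel j = (pvScanL p x i : Int) - 1 := by
  intro fuel
  induction fuel with
  | zero =>
    intro j h1 h2 h3 h4
    have : j = -1 := by omega
    subst this
    rw [scanL_zero p x i (fun k hk => h4 k (by omega) hk)]
    rfl
  | succ f ih =>
    intro j h1 h2 h3 h4
    by_cases hc : 0 ≤ j ∧ p.getD j.toNat 0 < x
    · have hjt : ((j.toNat : Int)) = j := Int.toNat_of_nonneg hc.1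
      have hti : j.toNat < i := by omega
      simp only [pvJumpL, if_pos hc]
      rw [hleft j.toNat hti]
      set s := pvScanL p (p.getD j.toNat 0) j.toNat with hs
      have hsle : s ≤ j.toNat := scanL_le p _ _
      refine ih ((s : Int) - 1) (by omega) (by omega) (by omega) ?_
      intro k hk1 hk2
      by_cases hkj : j < (k : Int)
      · exact h4 k hkj hk2
      · by_cases hkt : k = j.toNat
        · subst hkt; exact hc.2
        · have hklt : k < j.toNat := by omega
          have hsk : s ≤ k := by omega
          calc p.getD k 0 < p.getD j.toNat 0 := scanL_after p _ j.toNat k hsk hklt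
            _ < x := hc.2
    · simp only [pvJumpL, if_neg hc]
      by_cases hj0 : 0 ≤ j
      · have hx : x ≤ p.getD j.toNat 0 := by
          rcases not_and_or.1 hc with h | h
          · exact absurd hj0 h
          · omega
        have hjt : ((j.toNat : Int)) = j := Int.toNat_of_nonneg hj0
        rw [scanL_stop p x i j.toNat (by omega) hx
          (fun k hk1 hk2 => h4 k (by omega) hk2)]
        omega
      · have : j = -1 := by omega
        subst this
        rw [scanL_zero p x i (fun k hk => h4 k (by omega) hk)]
        rfl

-- the right jump loop of B lands exactly at the boundary the right scan characterizes
lemma jumpR_eq (p : List Int) (x : Int) (n : Nat) (right : List Int) (i : Nat) (hi : i < n)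
    (hright : ∀ m, i + 1 ≤ m → m < n →
      right.getD (n - 1 - m) 0 = (pvScanR p (p.getD m 0) (n - 1 - m) m : Int)) :
    ∀ (fuel : Nat) (j : Int), (i : Int) + 1 ≤ j → j ≤ (n : Int) → (n : Int) - j ≤ (fuel : Int) →
      (∀ k : Nat, (i : Int) < k → (k : Int) < j → p.getD k 0 ≤ x) →
      pvJumpR p x n right fuel j = (pvScanR p x (n - 1 - i) i : Int) + 1 := by
  intro fuel
  induction fuel with
  | zero =>
    intro j h1 h2 h3 h4
    have hj : j = (n : Int) := by omega
    subst hj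
    rw [scanR_full p x (n - 1 - i) i (fun k hk1 hk2 => h4 k (by omega) (by omega))]
    simp only [pvJumpR]
    omega
  | succ f ih =>
    intro j h1 h2 h3 h4
    by_cases hc : j ≤ (n : Int) - 1 ∧ p.getD j.toNat 0 ≤ x
    · have hj0 : (0 : Int) ≤ j := by omega
      have hjt : ((j.toNat : Int)) = j := Int.toNat_of_nonneg hj0
      have htn : j.toNat < n := by omega
      have hit : i + 1 ≤ j.toNat := by omega
      simp only [pvJumpR, if_pos hc]
      rw [hright j.toNat hit htn]
      set s := pvScanR p (p.getD j.toNat 0) (n - 1 - j.toNat) j.toNat with hs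
      have hsge : j.toNat ≤ s := scanR_ge p _ _ _
      have hsle : s ≤ j.toNat + (n - 1 - j.toNat) := scanR_le p _ _ _
      refine ih ((s : Int) + 1) (by omega) (by omega) (by omega) ?_
      intro k hk1 hk2
      by_cases hkj : (k : Int) < j
      · exact h4 k hk1 hkj
      · by_cases hkt : k = j.toNat
        · subst hkt; exact hc.2
        · have : j.toNat < k := by omega
          have hks : k ≤ s := by omega
          calc p.getD k 0 ≤ p.getD j.toNat 0 := scanR_within p _ _ j.toNat k this hks
            _ ≤ x := hc.2
    · simp only [pvJumpR, if_neg hc]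
      by_cases hjn : j ≤ (n : Int) - 1
      · have hx : x < p.getD j.toNat 0 := by
          rcases not_and_or.1 hc with h | h
          · exact absurd hjn h
          · omega
        have hj0 : (0 : Int) ≤ j := by omega
        have hjt : ((j.toNat : Int)) = j := Int.toNat_of_nonneg hj0
        rw [scanR_stop p x (n - 1 - i) i j.toNat (by omega) (by omega)
          (fun k hk1 hk2 => h4 k (by omega) (by omega)) hx]
        omega
      · have hj : j = (n : Int) := by omega
        subst hj
        rw [scanR_full p x (n - 1 - i) i (fun k hk1 hk2 => h4 k (by omega) (by omega))]
        omega

lemma length_rangeFrom (b n : Nat) : (rangeFrom b n).length = n - b := by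
  simp [rangeFrom]

lemma getD_reverse_map_rangeFrom {f : Nat → Int} {b n m : Nat} (h1 : b ≤ m) (h2 : m < n) :
    (((rangeFrom b n).map f).reverse).getD (n - 1 - m) 0 = f m := by
  rw [← List.map_reverse, List.getD_eq_getElem?_getD, List.getElem?_map,
    List.getElem?_reverse (by rw [length_rangeFrom]; omega)]
  rw [length_rangeFrom]
  unfold rangeFrom
  rw [List.getElem?_map, List.getElem?_range (by omega)]
  simp only [Option.map_some, Option.getD_some]
  congr 1
  omega

lemma altLeft_fold (p : List Int) :
    ∀ m, (List.range m).foldl (fun (acc : List Int) i =>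
        acc ++ [pvJumpL p (p.getD i 0) acc i ((i : Int) - 1) + 1]) []
      = (List.range m).map (fun i => (pvScanL p (p.getD i 0) i : Int)) := by
  intro m
  induction m with
  | zero => simp
  | succ m ih =>
    rw [List.range_succ, List.foldl_append, ih, List.foldl_cons, List.foldl_nil]
    have hj : pvJumpL p (p.getD m 0)
        ((List.range m).map (fun i => (pvScanL p (p.getD i 0) i : Int))) m ((m : Int) - 1)
        = (pvScanL p (p.getD m 0) m : Int) - 1 := by
      refine jumpL_eq p (p.getD m 0) _ m
        (fun m' hm' => getD_map_range hm') m ((m : Int) - 1)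
        (by omega) (by omega) (by omega) (fun k hk1 hk2 => by omega)
    rw [hj, List.map_append, List.map_cons, List.map_nil]
    congr 2
    omega

lemma altRight_fold (p : List Int) (n : Nat) :
    ∀ fuel i, i + fuel = n →
      (rangeFrom i n).reverse.foldl (fun (acc : List Int) i' =>
          acc ++ [pvJumpR p (p.getD i' 0) n acc (n - i') ((i' : Int) + 1) - 1]) []
      = ((rangeFrom i n).map (fun i' => ((pvScanR p (p.getD i' 0) (n - 1 - i') i' : Nat) : Int))).reverse := by
  intro fuel
  induction fuel with
  | zero =>
    intro i hi
    have : i = n := by omega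
    subst this
    simp [rangeFrom]
  | succ f ih =>
    intro i hi
    have hin : i < n := by omega
    rw [rangeFrom_cons hin, List.reverse_cons, List.foldl_append, ih (i + 1) (by omega),
      List.foldl_cons, List.foldl_nil]
    have hj : pvJumpR p (p.getD i 0) n
        (((rangeFrom (i + 1) n).map
          (fun i' => ((pvScanR p (p.getD i' 0) (n - 1 - i') i' : Nat) : Int))).reverse)
        (n - i) ((i : Int) + 1)
        = (pvScanR p (p.getD i 0) (n - 1 - i) i : Int) + 1 := by
      refine jumpR_eq p (p.getD i 0) n _ i hin
        (fun m hm1 hm2 => getD_reverse_map_rangeFrom hm1 hm2) (n - i) ((i : Int) + 1)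
        (by omega) (by omega) (by omega) (fun k hk1 hk2 => by omega)
    rw [hj, List.map_cons, List.reverse_cons]
    congr 2
    omega

theorem compute_subarray_counts_spec : Claim_equal_compute_subarray_counts := by
  intro p _
  unfold Spec_compute_subarray_counts compute_subarray_counts compute_subarray_counts_alt
  have hR := right_fold p p.length rfl p.length 0 (by omega)
  rw [rangeFrom_zero] at hR
  have hBR := altRight_fold p p.length p.length 0 (by omega)
  rw [rangeFrom_zero] at hBR
  simp only [left_fold p, hR, altLeft_fold p, hBR, List.reverse_reverse]
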